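-- pv_equiv track=rewrite | github.com/jlutch/npuzzle | puzzle.py | CreateSolvedBoard
-- ===== SOURCE A (Python) =====
-- def CreateSolvedBoard(state):
-- 	solved = []
-- 	nums = []
-- 	#fills a 2D list with the solved state based on
-- 	#the demesniosn of the given state
-- 	for x in range(1, len(state)**2 + 1):
-- 		nums.append(x)
-- 	for row in range(len(state)):
-- 		make_row = []
-- 		for col in range(len(state)):
-- 			make_row.append(nums.pop(0))
-- 		solved.append(make_row)
-- 	solved[len(state)-1][len(state)-1] = 0
-- 	return solved
-- ===== SOURCE B (Python) =====
-- def CreateSolvedBoard(state):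
--     n = len(state)
--     return [[0 if r == n - 1 and c == n - 1 else r * n + c + 1 for c in range(n)]
--             for r in range(n)]
-- ===== Notes on version B (the rewrite author's own statement) =====
-- stated objective: faster
-- what changed: B computes each cell directly as r*n+c+1 (0 at the last cell) in a comprehension, instead of materialising the 1..n^2 list and repeatedly nums.pop(0), whose front-pops shift the whole list each time.
-- crash fix: On the empty board state=[] A raises IndexError at solved[-1][-1]=0 while B returns []. — e.g. on CreateSolvedBoard([]): A raises IndexError, B returns []
import Mathlib
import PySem

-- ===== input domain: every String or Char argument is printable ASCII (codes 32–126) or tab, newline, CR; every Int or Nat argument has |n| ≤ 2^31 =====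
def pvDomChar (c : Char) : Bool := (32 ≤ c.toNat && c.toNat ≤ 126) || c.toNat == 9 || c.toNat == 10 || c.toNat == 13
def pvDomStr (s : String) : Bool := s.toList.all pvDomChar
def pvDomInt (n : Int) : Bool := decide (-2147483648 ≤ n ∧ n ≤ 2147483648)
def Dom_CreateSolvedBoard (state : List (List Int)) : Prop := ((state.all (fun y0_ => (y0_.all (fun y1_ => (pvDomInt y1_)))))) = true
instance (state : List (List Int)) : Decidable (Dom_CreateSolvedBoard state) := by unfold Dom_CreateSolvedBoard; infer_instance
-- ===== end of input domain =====

-- B computes each cell directly as r*n+c+1 (0 at the last cell) instead of building the 1..n^2 worklist and repeatedly popping its front (objective: faster).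

-- ===== PORT A =====
-- one step of 'make_row.append(nums.pop(0))'; pop(0) on [] would raise in Python (unreachable under Pre_)
def pvPopStep (acc : List Int × List Int) : List Int × List Int :=
  match acc.2 with
  | [] => acc
  | x :: rest => (acc.1 ++ [x], rest)

-- the inner 'for col in range(len(state))' loop: (make_row, nums)
def pvInnerLoop (n : Nat) (L : List Int) : List Int × List Int :=
  (List.range n).foldl (fun acc2 _ => pvPopStep acc2) (([] : List Int), L)

-- one iteration of the outer 'for row in range(len(state))' loop: (solved, nums)
def pvOuterStep (n : Nat) (acc : List (List Int) × List Int) : List (List Int) × List Int :=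
  let inner := pvInnerLoop n acc.2
  (acc.1 ++ [inner.1], inner.2)

def CreateSolvedBoard (state : List (List Int)) : List (List Int) :=
  let n := state.length
  let nums := (PySem.List.pyRange 1 ((n : Int) ^ 2 + 1) 1).foldl (fun acc x => acc ++ [x]) []
  let p := (List.range n).foldl (fun acc _ => pvOuterStep n acc) (([] : List (List Int)), nums)
  -- solved[len(state)-1][len(state)-1] = 0  (n ≥ 1 under Pre_, so the index is in range)
  p.1.set (n - 1) ((p.1.getD (n - 1) []).set (n - 1) 0)

-- ===== PORT B =====
def CreateSolvedBoard_alt (state : List (List Int)) : List (List Int) :=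
  let n := state.length
  (List.range n).map (fun r =>
    (List.range n).map (fun c =>
      if r = n - 1 ∧ c = n - 1 then (0 : Int) else ((r * n + c : Nat) : Int) + 1))

-- ===== PRECONDITION & SPEC =====
-- Pre_ excludes only the empty board, on which A raises IndexError at 'solved[-1][-1] = 0'.
def Pre_CreateSolvedBoard (state : List (List Int)) : Prop := state ≠ []
instance (state : List (List Int)) : Decidable (Pre_CreateSolvedBoard state) := by
  unfold Pre_CreateSolvedBoard; infer_instance

def pvWitness_CreateSolvedBoard : List (List Int) := [[1, 2], [3, 4]]

-- On the empty board state = [] A raises IndexError while B returns [].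
def Raises_CreateSolvedBoard (state : List (List Int)) : Prop := state = []
instance (state : List (List Int)) : Decidable (Raises_CreateSolvedBoard state) := by
  unfold Raises_CreateSolvedBoard; infer_instance
def pvRaiseWitness_CreateSolvedBoard : List (List Int) := []
def pvRaiseWitnessOut_CreateSolvedBoard : List (List Int) := []

def Spec_CreateSolvedBoard (state : List (List Int)) (out : List (List Int)) : Prop := out = CreateSolvedBoard_alt state
instance (state : List (List Int)) (out : List (List Int)) : Decidable (Spec_CreateSolvedBoard state out) := by unfold Spec_CreateSolvedBoard; infer_instance

-- ===== CLAIM (what is proved, stated in full; the proofs are below) =====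
def Claim_equal_CreateSolvedBoard : Prop := ∀ (state : List (List Int)), Dom_CreateSolvedBoard state → Pre_CreateSolvedBoard state → Spec_CreateSolvedBoard state (CreateSolvedBoard state)

def Claim_raises_CreateSolvedBoard : Prop := (∀ (state : List (List Int)), Dom_CreateSolvedBoard state → Raises_CreateSolvedBoard state → ¬ Pre_CreateSolvedBoard state) ∧ (Dom_CreateSolvedBoard (pvRaiseWitness_CreateSolvedBoard) ∧ Raises_CreateSolvedBoard (pvRaiseWitness_CreateSolvedBoard) ∧ CreateSolvedBoard_alt (pvRaiseWitness_CreateSolvedBoard) = pvRaiseWitnessOut_CreateSolvedBoard)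

-- ===== LEMMAS AND PROOFS =====

-- 'for x in range(...): nums.append(x)' just builds the range list
theorem pv_foldl_append (xs acc : List Int) :
    xs.foldl (fun acc x => acc ++ [x]) acc = acc ++ xs := by
  induction xs generalizing acc with
  | nil => simp
  | cons y ys ih => simp [List.foldl_cons, ih]

-- the worklist is [1, 2, …, n²]
theorem pv_nums (n : Nat) :
    PySem.List.pyRange 1 ((n : Int) ^ 2 + 1) 1
      = (List.range (n * n)).map (fun k : Nat => (1 : Int) + (k : Int)) := by
  rw [PySem.List.pyRange_one]
  have h : ((n : Int) ^ 2 + 1 - 1) = ((n * n : Nat) : Int) := by push_cast; ring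
  rw [h, Int.toNat_natCast]

-- the inner loop pops the first k elements of L
theorem pv_inner (k : Nat) (L : List Int) (hk : k ≤ L.length) :
    pvInnerLoop k L = (L.take k, L.drop k) := by
  unfold pvInnerLoop
  induction k with
  | zero => simp
  | succ m ih =>
    have hm : m < L.length := by omega
    rw [List.range_succ, List.foldl_append, ih (by omega)]
    simp only [List.foldl_cons, List.foldl_nil]
    have hd : L.drop m = L[m] :: L.drop (m + 1) := List.drop_eq_getElem_cons hm
    conv_lhs => rw [hd]
    show (L.take m ++ [L[m]], L.drop (m + 1)) = _
    rw [List.take_add_one, List.getElem?_eq_getElem hm]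
    simp

-- the outer loop splits L into consecutive chunks of length n
theorem pv_outer (n k : Nat) (L : List Int) (hk : k * n ≤ L.length) :
    (List.range k).foldl (fun acc _ => pvOuterStep n acc) (([] : List (List Int)), L)
      = ((List.range k).map (fun r => (L.drop (r * n)).take n), L.drop (k * n)) := by
  induction k with
  | zero => simp
  | succ m ih =>
    have hmn : m * n + n ≤ L.length := by rw [Nat.succ_mul] at hk; exact hk
    rw [List.range_succ, List.foldl_append, ih (by omega)]
    have h2 : n ≤ (L.drop (m * n)).length := by
      rw [List.length_drop]; omega
    simp only [List.foldl_cons, List.foldl_nil, pvOuterStep]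
    rw [pv_inner n (L.drop (m * n)) h2]
    simp [List.drop_drop]
    rw [Nat.succ_mul]

-- row r of the chunked worklist, as a direct formula
theorem pv_row (n r : Nat) (hr : r < n) :
    ((((List.range (n * n)).map (fun k : Nat => (1 : Int) + (k : Int))).drop (r * n)).take n)
      = (List.range n).map (fun c => ((r * n + c : Nat) : Int) + 1) := by
  have hrn : r * n + n ≤ n * n := by
    have := Nat.mul_le_mul_right n (show r + 1 ≤ n from hr)
    rw [Nat.succ_mul] at this
    exact le_of_le_of_eq this (Nat.mul_comm n n)
  apply List.ext_getElem
  · simp only [List.length_take, List.length_drop, List.length_map, List.length_range]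
    omega
  · intro c hc1 hc2
    simp only [List.length_map, List.length_range] at hc2
    simp only [List.getElem_take, List.getElem_drop, List.getElem_map, List.getElem_range]
    push_cast; ring

theorem CreateSolvedBoard_eq (state : List (List Int)) (h : state ≠ []) :
    CreateSolvedBoard state = CreateSolvedBoard_alt state := by
  have hn1 : 0 < state.length := List.length_pos_iff.mpr h
  simp only [CreateSolvedBoard, CreateSolvedBoard_alt]
  rw [pv_foldl_append, List.nil_append, pv_nums,
      pv_outer state.length state.length _ (by simp)]
  set n := state.length with hn
  dsimp only
  have hboard :
      (List.range n).map (fun r =>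
        (((List.range (n * n)).map (fun k : Nat => (1 : Int) + (k : Int))).drop (r * n)).take n)
        = (List.range n).map (fun r =>
            (List.range n).map (fun c => ((r * n + c : Nat) : Int) + 1)) :=
    List.map_congr_left (fun r hr => pv_row n r (List.mem_range.mp hr))
  rw [hboard]
  have hgetD :
      ((List.range n).map (fun r =>
        (List.range n).map (fun c => ((r * n + c : Nat) : Int) + 1))).getD (n - 1) []
        = (List.range n).map (fun c => (((n - 1) * n + c : Nat) : Int) + 1) := by
    rw [List.getD_eq_getElem _ _ (by simp; omega), List.getElem_map, List.getElem_range]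
  rw [hgetD]
  apply List.ext_getElem
  · simp
  · intro r hr1 hr2
    simp only [List.length_map, List.length_range] at hr2
    rw [List.getElem_set]
    by_cases hcase : n - 1 = r
    · rw [if_pos hcase]
      simp only [List.getElem_map, List.getElem_range]
      apply List.ext_getElem
      · simp
      · intro c hc1 hc2
        simp only [List.length_map, List.length_range] at hc2
        rw [List.getElem_set]
        by_cases hc : n - 1 = c
        · rw [if_pos hc]
          simp only [List.getElem_map, List.getElem_range]
          rw [if_pos ⟨hcase.symm, hc.symm⟩]
        · rw [if_neg hc]
          simp only [List.getElem_map, List.getElem_range]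
          rw [if_neg (by rintro ⟨-, hcc⟩; exact hc hcc.symm), ← hcase]
    · rw [if_neg hcase]
      simp only [List.getElem_map, List.getElem_range]
      apply List.map_congr_left
      intro c hc
      rw [if_neg (by rintro ⟨hrr, -⟩; exact hcase hrr.symm)]

-- ===== VERDICT (by name: the statement is the Claim_ definition above) =====
theorem CreateSolvedBoard_spec : Claim_equal_CreateSolvedBoard := by
  intro state _ hpre
  unfold Spec_CreateSolvedBoard
  exact CreateSolvedBoard_eq state hpre

def CreateSolvedBoard_raises : Claim_raises_CreateSolvedBoard := by
  unfold Claim_raises_CreateSolvedBoard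
  exact ⟨fun state _ hr hp => hp hr, by decide⟩
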